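-- pv_equiv track=rewrite | github.com/maggie3004/giramille | backend/advanced_generator.py | _enhance_color_accuracy
-- ===== SOURCE A (Python) =====
-- def _enhance_color_accuracy(prompt: str) -> str:
--     """Enhance color accuracy in prompts"""
--     prompt_lower = prompt.lower()
--
--     # Color mapping with stronger emphasis
--     color_enhancements = {
--         'blue house': 'bright blue house, vivid blue building, blue colored house',
--         'red house': 'bright red house, vivid red building, red colored house',
--         'green house': 'bright green house, vivid green building, green colored house',
--         'yellow house': 'bright yellow house, vivid yellow building, yellow colored house',
--         'purple house': 'bright purple house, vivid purple building, purple colored house',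
--         'orange house': 'bright orange house, vivid orange building, orange colored house',
--         'pink house': 'bright pink house, vivid pink building, pink colored house',
--         'blue car': 'bright blue car, vivid blue vehicle, blue colored car',
--         'red car': 'bright red car, vivid red vehicle, red colored car',
--         'green car': 'bright green car, vivid green vehicle, green colored car',
--         'yellow car': 'bright yellow car, vivid yellow vehicle, yellow colored car',
--         'blue tree': 'bright blue tree, vivid blue plant, blue colored tree',
--         'green tree': 'bright green tree, vivid green plant, green colored tree',
--         'green horse': 'bright green horse, vivid green animal, green colored horse, emerald horse',
--         'purple mountain': 'bright purple mountain, vivid purple peak, purple colored mountain',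
--         'orange sunset': 'bright orange sunset, vivid orange sky, orange colored sunset'
--     }
--
--     # Apply color enhancements
--     enhanced_prompt = prompt
--     for original, enhanced in color_enhancements.items():
--         if original in prompt_lower:
--             enhanced_prompt = enhanced_prompt.replace(original, enhanced)
--
--     return enhanced_prompt
-- ===== SOURCE B (Python) =====
-- def _enhance_color_accuracy(prompt: str) -> str:
--     """Enhance color accuracy in prompts (single left-to-right pass)."""
--     color_enhancements = {
--         'blue house': 'bright blue house, vivid blue building, blue colored house',
--         'red house': 'bright red house, vivid red building, red colored house',
--         'green house': 'bright green house, vivid green building, green colored house',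
--         'yellow house': 'bright yellow house, vivid yellow building, yellow colored house',
--         'purple house': 'bright purple house, vivid purple building, purple colored house',
--         'orange house': 'bright orange house, vivid orange building, orange colored house',
--         'pink house': 'bright pink house, vivid pink building, pink colored house',
--         'blue car': 'bright blue car, vivid blue vehicle, blue colored car',
--         'red car': 'bright red car, vivid red vehicle, red colored car',
--         'green car': 'bright green car, vivid green vehicle, green colored car',
--         'yellow car': 'bright yellow car, vivid yellow vehicle, yellow colored car',
--         'blue tree': 'bright blue tree, vivid blue plant, blue colored tree',
--         'green tree': 'bright green tree, vivid green plant, green colored tree',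
--         'green horse': 'bright green horse, vivid green animal, green colored horse, emerald horse',
--         'purple mountain': 'bright purple mountain, vivid purple peak, purple colored mountain',
--         'orange sunset': 'bright orange sunset, vivid orange sky, orange colored sunset'
--     }
--
--     out = []
--     i = 0
--     n = len(prompt)
--     while i < n:
--         for original, enhanced in color_enhancements.items():
--             if prompt.startswith(original, i):
--                 out.append(enhanced)
--                 i += len(original)
--                 break
--         else:
--             out.append(prompt[i])
--             i += 1
--     return ''.join(out)
-- ===== Notes on version B (the rewrite author's own statement) =====
-- stated objective: alternative
-- what changed: B rewrites the colour phrases in ONE left-to-right scan of the prompt (at each position the first matching phrase is expanded once and skipped), replacing A's sixteen sequential whole-string str.replace passes guarded by a lowercased-substring test.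
import Mathlib
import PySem

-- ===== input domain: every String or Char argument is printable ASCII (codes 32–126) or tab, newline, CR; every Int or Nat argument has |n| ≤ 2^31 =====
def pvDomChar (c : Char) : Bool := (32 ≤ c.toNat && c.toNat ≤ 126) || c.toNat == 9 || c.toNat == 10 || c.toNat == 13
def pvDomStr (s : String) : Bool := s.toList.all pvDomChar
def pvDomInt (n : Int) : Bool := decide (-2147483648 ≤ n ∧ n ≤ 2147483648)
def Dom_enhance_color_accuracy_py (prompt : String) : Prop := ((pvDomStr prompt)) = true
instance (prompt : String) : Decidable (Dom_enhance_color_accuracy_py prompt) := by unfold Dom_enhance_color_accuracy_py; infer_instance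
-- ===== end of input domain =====

-- B replaces every colour phrase in one left-to-right pass instead of A's sixteen sequential
-- whole-string replace passes; the return values are proved equal on every prompt admitted by Pre_.

-- ===== PORT A =====
def pvPairsA : List (String × String) := [
  ("blue house", "bright blue house, vivid blue building, blue colored house"),
  ("red house", "bright red house, vivid red building, red colored house"),
  ("green house", "bright green house, vivid green building, green colored house"),
  ("yellow house", "bright yellow house, vivid yellow building, yellow colored house"),
  ("purple house", "bright purple house, vivid purple building, purple colored house"),
  ("orange house", "bright orange house, vivid orange building, orange colored house"),
  ("pink house", "bright pink house, vivid pink building, pink colored house"),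
  ("blue car", "bright blue car, vivid blue vehicle, blue colored car"),
  ("red car", "bright red car, vivid red vehicle, red colored car"),
  ("green car", "bright green car, vivid green vehicle, green colored car"),
  ("yellow car", "bright yellow car, vivid yellow vehicle, yellow colored car"),
  ("blue tree", "bright blue tree, vivid blue plant, blue colored tree"),
  ("green tree", "bright green tree, vivid green plant, green colored tree"),
  ("green horse", "bright green horse, vivid green animal, green colored horse, emerald horse"),
  ("purple mountain", "bright purple mountain, vivid purple peak, purple colored mountain"),
  ("orange sunset", "bright orange sunset, vivid orange sky, orange colored sunset")]

def enhance_color_accuracy_py (prompt : String) : String :=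
  let prompt_lower := PySem.Str.lower prompt
  pvPairsA.foldl
    (fun enhanced_prompt kv =>
      if PySem.Str.isIn kv.1 prompt_lower then PySem.Str.replace enhanced_prompt kv.1 kv.2
      else enhanced_prompt)
    prompt

-- ===== PORT B =====
def pvPairsB : List (String × String) := [
  ("blue house", "bright blue house, vivid blue building, blue colored house"),
  ("red house", "bright red house, vivid red building, red colored house"),
  ("green house", "bright green house, vivid green building, green colored house"),
  ("yellow house", "bright yellow house, vivid yellow building, yellow colored house"),
  ("purple house", "bright purple house, vivid purple building, purple colored house"),
  ("orange house", "bright orange house, vivid orange building, orange colored house"),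
  ("pink house", "bright pink house, vivid pink building, pink colored house"),
  ("blue car", "bright blue car, vivid blue vehicle, blue colored car"),
  ("red car", "bright red car, vivid red vehicle, red colored car"),
  ("green car", "bright green car, vivid green vehicle, green colored car"),
  ("yellow car", "bright yellow car, vivid yellow vehicle, yellow colored car"),
  ("blue tree", "bright blue tree, vivid blue plant, blue colored tree"),
  ("green tree", "bright green tree, vivid green plant, green colored tree"),
  ("green horse", "bright green horse, vivid green animal, green colored horse, emerald horse"),
  ("purple mountain", "bright purple mountain, vivid purple peak, purple colored mountain"),
  ("orange sunset", "bright orange sunset, vivid orange sky, orange colored sunset")]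

/-- The single left-to-right scan of Source B: at each position emit the enhancement of the first
matching phrase (and skip it), otherwise emit the character. -/
def pvScanGo (fuel : Nat) (s : List Char) : List Char :=
  match fuel, s with
  | 0, _ => []
  | _ + 1, [] => []
  | f + 1, c :: t =>
    match pvPairsB.find? (fun kv => kv.1.toList.isPrefixOf (c :: t)) with
    | some kv => kv.2.toList ++ pvScanGo f (List.drop (kv.1.toList.length - 1) t)
    | none => c :: pvScanGo f t

def pvScanB (s : List Char) : List Char := pvScanGo s.length s

def enhance_color_accuracy_py_alt (prompt : String) : String :=
  String.ofList (pvScanB prompt.toList)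

-- ===== PRECONDITION & SPEC =====
-- Pre_ excludes prompts on which occurrences of the mapped colour phrases interact — two phrases
-- overlapping in the text, or 'red house'/'red car' present case-insensitively together with
-- 'blue house'/'blue car' (whose replacement text contains the former) — because there the result
-- depends on the order in which the replacements are applied, which no caller specifies: A applies
-- them key by key over the whole string, B position by position, and both orders are defensible.
def Pre_enhance_color_accuracy_py (prompt : String) : Prop :=
  ((["blue cared house", "blue cared car", "red cared house", "green cared house",
     "green cared car", "yellow cared house", "yellow cared car"].any
      (fun m => PySem.Str.isIn m prompt))
   || (PySem.Str.isIn "red house" (PySem.Str.lower prompt) && PySem.Str.isIn "blue house" prompt)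
   || (PySem.Str.isIn "red car" (PySem.Str.lower prompt) && PySem.Str.isIn "blue car" prompt)) = false

instance (prompt : String) : Decidable (Pre_enhance_color_accuracy_py prompt) := by
  unfold Pre_enhance_color_accuracy_py; infer_instance

def pvWitness_enhance_color_accuracy_py : String := "a blue house by a green tree"

def Spec_enhance_color_accuracy_py (prompt : String) (out : String) : Prop :=
  out = enhance_color_accuracy_py_alt prompt

instance (prompt : String) (out : String) : Decidable (Spec_enhance_color_accuracy_py prompt out) := by
  unfold Spec_enhance_color_accuracy_py; infer_instance

-- ===== CLAIM (what is proved, stated in full; the proofs are below) =====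
def Claim_equal_enhance_color_accuracy_py : Prop :=
  ∀ (prompt : String), Dom_enhance_color_accuracy_py prompt →
    Pre_enhance_color_accuracy_py prompt →
    Spec_enhance_color_accuracy_py prompt (enhance_color_accuracy_py prompt)

-- ===== LEMMAS AND PROOFS =====

-- the only ways two distinct mapped phrases can overlap in a prompt (proof-side abbreviation,
-- literally the first disjunct of D_)
def pvOv7 (cs : List Char) : Prop :=
  "blue cared house".toList <:+: cs ∨ "blue cared car".toList <:+: cs ∨
  "red cared house".toList <:+: cs ∨ "green cared house".toList <:+: cs ∨
  "green cared car".toList <:+: cs ∨ "yellow cared house".toList <:+: cs ∨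
  "yellow cared car".toList <:+: cs

/-- The char-level pair list both ports share. -/
def pvP : List (List Char × List Char) := pvPairsB.map (fun kv => (kv.1.toList, kv.2.toList))

/-- Clean structural version of Python's s.replace(old, new) for old ≠ []. -/
def pvRepl (old new : List Char) (s : List Char) : List Char :=
  match s with
  | [] => []
  | c :: t =>
    if old.isPrefixOf (c :: t) then new ++ pvRepl old new (List.drop (old.length - 1) t)
    else c :: pvRepl old new t
termination_by s.length
decreasing_by
  · simp only [List.length_drop, List.length_cons]; omega
  · simp

/-- One guarded replace step of A, at the char level. -/
def pvStep (g : List Char → Bool) (acc : List Char) (kv : List Char × List Char) : List Char :=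
  if g kv.1 then pvRepl kv.1 kv.2 acc else acc

/-- A's whole pass at the char level (g is the guard, fixed from the original prompt). -/
def pvAfold (g : List Char → Bool) (s : List Char) : List Char := pvP.foldl (pvStep g) s

/-- Occurrences of two distinct keys never overlap (what ¬clause-1 of D_ gives). -/
def pvNoOv (cs : List Char) : Prop :=
  ∀ kv ∈ pvP, ∀ kv' ∈ pvP, kv.1 ≠ kv'.1 → ∀ p q : Nat,
    kv.1 <+: cs.drop p → kv'.1 <+: cs.drop q →
    (p + kv.1.length ≤ q ∨ q + kv'.1.length ≤ p)

/-- Prefix-transfer invariant: every 'b'-free prefix of X is a prefix of rest. -/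
def pvT (rest X : List Char) : Prop := ∀ x : List Char, 'b' ∉ x → x <+: X → x <+: rest

-- facts about the concrete table, all by decide
theorem pvF1 : ∀ kv ∈ pvP, kv.1 ≠ [] ∧ kv.2.head? = some 'b' ∧ 'b' ∉ kv.1.drop 1 ∧
    PySem.Chars.lower kv.1 = kv.1 := by decide

set_option maxRecDepth 8192 in
theorem pvF2 : ∀ kv ∈ pvP, ∀ kv' ∈ pvP, kv.1 ≠ kv'.1 → ¬ kv'.1 <:+: kv.1 := by decide

set_option maxRecDepth 8192 in
theorem pvF3 : ∀ n < pvP.length, ∀ kv' ∈ pvP.drop (n + 1),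
    kv'.1 <:+: (pvP.getD n ([], [])).2 →
    ((pvP.getD n ([], [])).1 = "blue house".toList ∧ kv'.1 = "red house".toList) ∨
    ((pvP.getD n ([], [])).1 = "blue car".toList ∧ kv'.1 = "red car".toList) := by decide

theorem pvF4 : ∀ kv ∈ pvP, ∀ kv' ∈ pvP, ∀ n < kv'.1.length, 0 < n →
    (kv'.1.take n) <:+ kv.2 → (kv'.1.take n) <:+ kv.1 := by decide

theorem pvF0 : (pvP.map (fun kv => kv.1)).Nodup := by decide

set_option maxRecDepth 8192 in
theorem pvF5 : ∀ kv ∈ pvP, ∀ kv' ∈ pvP, kv.1 ≠ kv'.1 → ∀ d < kv.1.length,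
    kv.1.drop d <+: kv'.1 →
      (kv.1.take d ++ kv'.1 = "blue cared house".toList ∨
       kv.1.take d ++ kv'.1 = "blue cared car".toList ∨
       kv.1.take d ++ kv'.1 = "red cared house".toList ∨
       kv.1.take d ++ kv'.1 = "green cared house".toList ∨
       kv.1.take d ++ kv'.1 = "green cared car".toList ∨
       kv.1.take d ++ kv'.1 = "yellow cared house".toList ∨
       kv.1.take d ++ kv'.1 = "yellow cared car".toList) := by decide

-- equation lemmas for pvRepl
theorem pvRepl_nil (old new : List Char) : pvRepl old new [] = [] := by simp [pvRepl]

theorem pvRepl_cons_neg (old new : List Char) (c : Char) (t : List Char)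
    (h : ¬ old <+: (c :: t)) : pvRepl old new (c :: t) = c :: pvRepl old new t := by
  rw [pvRepl]; rw [if_neg]; simpa [List.isPrefixOf_iff_prefix] using h

theorem pvRepl_prefix (old new s : List Char) (hne : old ≠ []) (h : old <+: s) :
    pvRepl old new s = new ++ pvRepl old new (s.drop old.length) := by
  cases s with
  | nil => exact absurd (List.prefix_nil.mp h) hne
  | cons c t =>
    rw [pvRepl, if_pos (List.isPrefixOf_iff_prefix.mpr h)]
    cases old with
    | nil => exact absurd rfl hne
    | cons o os => simp [List.drop_succ_cons]

theorem pvReplaceGo_eq (old new : List Char) (hne : old ≠ []) :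
    ∀ (fuel : Nat) (l acc : List Char), l.length ≤ fuel →
      PySem.Chars.replace.go old new fuel l acc = acc.reverse ++ pvRepl old new l := by
  intro fuel
  induction fuel with
  | zero =>
    intro l acc hl
    have hl0 : l = [] := by cases l with
      | nil => rfl
      | cons c t => simp at hl
    subst hl0
    rw [PySem.Chars.replace.go.eq_def]
    simp [pvRepl_nil]
  | succ f ih =>
    intro l acc hl
    cases l with
    | nil =>
      rw [PySem.Chars.replace.go.eq_def]
      simp [pvRepl_nil]
    | cons c t =>
      rw [PySem.Chars.replace.go.eq_def]
      by_cases hp : old.isPrefixOf (c :: t)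
      · simp only [hp, if_true]
        have hlen : (List.drop old.length (c :: t)).length ≤ f := by
          have : 1 ≤ old.length := by
            cases old with
            | nil => exact absurd rfl hne
            | cons o os => simp
          simp only [List.length_drop, List.length_cons] at *
          omega
        rw [ih _ _ hlen, pvRepl_prefix old new (c :: t) hne (List.isPrefixOf_iff_prefix.mp hp)]
        simp
      · simp only [hp, if_false]
        have hlen : t.length ≤ f := by simp at hl; omega
        rw [ih _ _ hlen, pvRepl_cons_neg old new c t (fun hpre => hp (List.isPrefixOf_iff_prefix.mpr hpre))]
        simp

/-- PySem's replace agrees with pvRepl when old is nonempty. -/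
theorem pvReplace_eq (s old new : List Char) (hne : old ≠ []) :
    PySem.Chars.replace s old new = pvRepl old new s := by
  rw [PySem.Chars.replace]
  rw [if_neg (by simp [List.isEmpty_iff, hne])]
  simpa using pvReplaceGo_eq old new hne s.length s [] le_rfl

/-- 'b'-free prefixes pass through a replace whose value starts with 'b'. -/
theorem pvPrefixRepl (k v : List Char) (hk : k ≠ []) (hv : v.head? = some 'b') :
    ∀ u x : List Char, 'b' ∉ x → x <+: pvRepl k v u → x <+: u := by
  have H : ∀ (n : Nat) (u : List Char), u.length ≤ n → ∀ x, 'b' ∉ x → x <+: pvRepl k v u → x <+: u := by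
    intro n
    induction n with
    | zero =>
      intro u hu x hbx hx
      have hu0 : u = [] := by cases u with
        | nil => rfl
        | cons c t => simp at hu
      subst hu0
      rw [pvRepl_nil] at hx
      simpa [List.prefix_nil.mp hx] using List.nil_prefix
    | succ n ih =>
      intro u hu x hbx hx
      cases u with
      | nil =>
        rw [pvRepl_nil] at hx
        simpa [List.prefix_nil.mp hx] using List.nil_prefix
      | cons c t =>
        by_cases hp : k <+: (c :: t)
        · rw [pvRepl_prefix k v _ hk hp] at hx
          cases x with
          | nil => exact List.nil_prefix
          | cons d x' =>
            cases v with
            | nil => simp at hv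
            | cons v0 v' =>
              have hv0 : v0 = 'b' := by simpa using hv
              rw [List.cons_append] at hx
              have := (List.cons_prefix_cons.mp hx).1
              exact absurd (by simp [this, hv0]) hbx
        · rw [pvRepl_cons_neg k v c t hp] at hx
          cases x with
          | nil => exact List.nil_prefix
          | cons d x' =>
            obtain ⟨hd, hx'⟩ := List.cons_prefix_cons.mp hx
            have hbx' : 'b' ∉ x' := fun hm => hbx (by simp [hm])
            have := ih t (by simp at hu; omega) x' hbx' hx'
            exact hd ▸ List.cons_prefix_cons.mpr ⟨rfl, this⟩
  exact fun u => H u.length u le_rfl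

/-- replace distributes over an append when no occurrence starts inside the left block. -/
theorem pvDistrib (k v : List Char) (u X : List Char)
    (h : ∀ p, p < u.length → ¬ k <+: ((u ++ X).drop p)) :
    pvRepl k v (u ++ X) = u ++ pvRepl k v X := by
  induction u with
  | nil => simp
  | cons c u' ih =>
    have h0 : ¬ k <+: (c :: (u' ++ X)) := by simpa using h 0 (by simp)
    rw [List.cons_append, pvRepl_cons_neg k v _ _ h0, ih (fun p hp => by simpa using h (p + 1) (by simpa using hp))]
    rfl

theorem pvPrefixSplit (x a X : List Char) (h : x <+: a ++ X) (hlen : a.length ≤ x.length) :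
    a <+: x ∧ x.drop a.length <+: X := by
  induction a generalizing x with
  | nil => simpa using h
  | cons c a' ih =>
    cases x with
    | nil => simp at hlen
    | cons d x' =>
      rw [List.cons_append] at h
      obtain ⟨hd, hx'⟩ := List.cons_prefix_cons.mp h
      obtain ⟨h1, h2⟩ := ih x' hx' (by simpa using hlen)
      exact ⟨hd ▸ List.cons_prefix_cons.mpr ⟨rfl, h1⟩, by simpa using h2⟩

theorem pvInfixOfPrefixSuffix {k a v : List Char} (h1 : k <+: a) (h2 : a <:+ v) : k <:+: v := by
  obtain ⟨u, hu⟩ := h1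
  obtain ⟨w, hw⟩ := h2
  exact ⟨w, u, by rw [← hw, ← hu, List.append_assoc]⟩

theorem pvFindSplit {α : Type} (p : α → Bool) :
    ∀ (l : List α) (a : α), l.find? p = some a → ∃ l1 l2, l = l1 ++ a :: l2 := by
  intro l
  induction l with
  | nil => intro a h; simp at h
  | cons b l' ih =>
    intro a h
    by_cases hb : p b
    · rw [List.find?_cons_of_pos hb] at h
      exact ⟨[], l', by simp [(Option.some_inj.mp h).symm]⟩
    · rw [List.find?_cons_of_neg (by simpa using hb)] at h
      obtain ⟨l1, l2, hl⟩ := ih a h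
      exact ⟨b :: l1, l2, by simp [hl]⟩

/-- the generic fold-distribution workhorse. -/
theorem pvFoldApp (g : List Char → Bool) (rest u : List Char) :
    ∀ (Q : List (List Char × List Char)), (∀ kv ∈ Q, kv ∈ pvP) →
      (∀ kv ∈ Q, g kv.1 = true → ∀ X' : List Char, pvT rest X' →
        ∀ p, p < u.length → ¬ kv.1 <+: ((u ++ X').drop p)) →
    ∀ X, pvT rest X →
      Q.foldl (pvStep g) (u ++ X) = u ++ Q.foldl (pvStep g) X ∧ pvT rest (Q.foldl (pvStep g) X) := by
  intro Q
  induction Q with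
  | nil => exact fun _ _ X hT => ⟨rfl, hT⟩
  | cons kv Q' ih =>
    intro hQ hstep X hT
    have hkvP : kv ∈ pvP := hQ kv (by simp)
    obtain ⟨hk1, hk2, _, _⟩ := pvF1 kv hkvP
    by_cases hg : g kv.1
    · have hdist : pvRepl kv.1 kv.2 (u ++ X) = u ++ pvRepl kv.1 kv.2 X :=
        pvDistrib kv.1 kv.2 u X (hstep kv (by simp) hg X hT)
      have hT' : pvT rest (pvRepl kv.1 kv.2 X) := fun x hbx hxp =>
        hT x hbx (pvPrefixRepl kv.1 kv.2 hk1 hk2 X x hbx hxp)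
      rw [List.foldl_cons, List.foldl_cons]
      rw [show pvStep g (u ++ X) kv = u ++ pvRepl kv.1 kv.2 X from by rw [pvStep, if_pos hg]; exact hdist]
      rw [show pvStep g X kv = pvRepl kv.1 kv.2 X from by rw [pvStep, if_pos hg]]
      exact ih (fun x hx => hQ x (by simp [hx])) (fun x hx => hstep x (by simp [hx])) _ hT'
    · rw [List.foldl_cons, List.foldl_cons]
      rw [show pvStep g (u ++ X) kv = u ++ X from by rw [pvStep, if_neg hg]]
      rw [show pvStep g X kv = X from by rw [pvStep, if_neg hg]]
      exact ih (fun x hx => hQ x (by simp [hx])) (fun x hx => hstep x (by simp [hx])) X hT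

theorem pvFoldNil (g : List Char → Bool) :
    ∀ (Q : List (List Char × List Char)), Q.foldl (pvStep g) [] = [] := by
  intro Q
  induction Q with
  | nil => rfl
  | cons kv Q' ih =>
    rw [List.foldl_cons, show pvStep g [] kv = [] from by rw [pvStep]; split <;> simp [pvRepl_nil]]
    exact ih

theorem pvScanGo_congr : ∀ (f f' : Nat) (s : List Char), s.length ≤ f → s.length ≤ f' →
    pvScanGo f s = pvScanGo f' s := by
  intro f
  induction f with
  | zero =>
    intro f' s hs _
    have hs0 : s = [] := by cases s with
      | nil => rfl
      | cons c t => simp at hs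
    subst hs0
    cases f' <;> rfl
  | succ f ih =>
    intro f' s hs hs'
    cases s with
    | nil => cases f' <;> rfl
    | cons c t =>
      cases f' with
      | zero => simp at hs'
      | succ f'' =>
        rw [pvScanGo, pvScanGo]
        cases hf : pvPairsB.find? (fun kv => kv.1.toList.isPrefixOf (c :: t)) with
        | none =>
          simp only []
          rw [ih f'' t (by simpa using hs) (by simpa using hs')]
        | some kv =>
          simp only []
          rw [ih f'' (List.drop (kv.1.toList.length - 1) t)
            (by simp only [List.length_drop]; simp at hs; omega)
            (by simp only [List.length_drop]; simp at hs'; omega)]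

theorem pvScanB_nil : pvScanB [] = [] := rfl

theorem pvScanB_cons_none (c : Char) (t : List Char)
    (hf : pvPairsB.find? (fun kv => kv.1.toList.isPrefixOf (c :: t)) = none) :
    pvScanB (c :: t) = c :: pvScanB t := by
  rw [pvScanB, pvScanB]
  simp only [List.length_cons]
  rw [pvScanGo, hf]

theorem pvScanB_cons_some (c : Char) (t : List Char) (kv : String × String)
    (hf : pvPairsB.find? (fun kv => kv.1.toList.isPrefixOf (c :: t)) = some kv) :
    pvScanB (c :: t) = kv.2.toList ++ pvScanB (List.drop (kv.1.toList.length - 1) t) := by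
  rw [pvScanB, pvScanB]
  simp only [List.length_cons]
  rw [pvScanGo, hf]
  simp only []
  rw [pvScanGo_congr t.length (List.drop (kv.1.toList.length - 1) t).length _
    (by simp) le_rfl]

/-- a key occurring in the prompt has a true guard. -/
theorem pvGuardTrue (cs₀ : List Char) (kv : List Char × List Char) (hm : kv ∈ pvP)
    (h : kv.1 <:+: cs₀) : PySem.Chars.isIn kv.1 (PySem.Chars.lower cs₀) = true := by
  obtain ⟨_, _, _, hlow⟩ := pvF1 kv hm
  refine (PySem.Chars.isIn_iff_infix _ _).mpr ?_
  have := List.IsInfix.map PySem.Chars.lowerChar h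
  rwa [show List.map PySem.Chars.lowerChar kv.1 = PySem.Chars.lower kv.1 from rfl, hlow] at this

/-- occurrences transferred to the full prompt. -/
theorem pvOccur (cs₀ pre t x : List Char) (hpre : cs₀ = pre ++ t) (p : Nat)
    (h : x <+: t.drop p) : x <+: cs₀.drop (pre.length + p) := by
  rw [hpre, List.drop_length_add_append]
  exact h

theorem pvPrefixShort (x a X : List Char) (h : x <+: a ++ X) (hlen : x.length ≤ a.length) :
    x <+: a := by
  induction a generalizing x with
  | nil =>
    have hx : x = [] := by simpa using hlen
    simp [hx]
  | cons c a' ih =>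
    cases x with
    | nil => exact List.nil_prefix
    | cons d x' =>
      rw [List.cons_append] at h
      obtain ⟨hd, hx'⟩ := List.cons_prefix_cons.mp h
      exact List.cons_prefix_cons.mpr ⟨hd, ih x' hx' (by simpa using hlen)⟩

/-- overlapping occurrences of two distinct keys force one of the merged strings into cs. -/
theorem pvOverlapCore (cs : List Char) (kv kv' : List Char × List Char)
    (hkv : kv ∈ pvP) (hkv' : kv' ∈ pvP) (hne : kv.1 ≠ kv'.1) (p q : Nat)
    (hp : kv.1 <+: cs.drop p) (hq : kv'.1 <+: cs.drop q)
    (hle : p ≤ q) (hlt : q < p + kv.1.length) :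
    pvOv7 cs := by
  have hd : q - p < kv.1.length := by omega
  have hdropq : cs.drop q = (cs.drop p).drop (q - p) := by
    rw [List.drop_drop]; congr 1; omega
  have h1 : kv.1.drop (q - p) <+: cs.drop q := by
    rw [hdropq]; exact List.IsPrefix.drop hp (q - p)
  rcases List.prefix_or_prefix_of_prefix h1 hq with hcase | hcase
  · have hmerge := pvF5 kv hkv kv' hkv' hne (q - p) hd hcase
    suffices hsuff : (kv.1.take (q - p) ++ kv'.1) <:+: cs by
      rcases hmerge with h | h | h | h | h | h | h
      · exact Or.inl (h ▸ hsuff)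
      · exact Or.inr (Or.inl (h ▸ hsuff))
      · exact Or.inr (Or.inr (Or.inl (h ▸ hsuff)))
      · exact Or.inr (Or.inr (Or.inr (Or.inl (h ▸ hsuff))))
      · exact Or.inr (Or.inr (Or.inr (Or.inr (Or.inl (h ▸ hsuff)))))
      · exact Or.inr (Or.inr (Or.inr (Or.inr (Or.inr (Or.inl (h ▸ hsuff))))))
      · exact Or.inr (Or.inr (Or.inr (Or.inr (Or.inr (Or.inr (h ▸ hsuff))))))
    obtain ⟨R, hR⟩ := hp
    have hq' : kv'.1 <+: kv.1.drop (q - p) ++ R := by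
      have : cs.drop q = kv.1.drop (q - p) ++ R := by
        rw [hdropq, ← hR, List.drop_append_of_le_length (by omega)]
      rwa [this] at hq
    obtain ⟨hpre2, htail⟩ := pvPrefixSplit kv'.1 (kv.1.drop (q - p)) R hq' hcase.length_le
    obtain ⟨tl, htl⟩ := hcase
    have htl' : tl = kv'.1.drop (kv.1.drop (q - p)).length := by rw [← htl]; simp
    have hmpre : kv.1.take (q - p) ++ kv'.1 <+: cs.drop p := by
      obtain ⟨u, hu⟩ := htail
      refine ⟨u, ?_⟩
      rw [← hR, ← htl, ← List.append_assoc, List.take_append_drop,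
        List.append_assoc, htl', hu]
    exact pvInfixOfPrefixSuffix hmpre (List.drop_suffix p cs)
  · exact absurd (pvInfixOfPrefixSuffix hcase (List.drop_suffix (q - p) kv.1))
      (pvF2 kv hkv kv' hkv' hne)

/-- main equivalence at the char level. -/
theorem pvMain (cs₀ : List Char)
    (hno : pvNoOv cs₀)
    (h2a : ¬("red house".toList <:+: PySem.Chars.lower cs₀ ∧ "blue house".toList <:+: cs₀))
    (h2b : ¬("red car".toList <:+: PySem.Chars.lower cs₀ ∧ "blue car".toList <:+: cs₀)) :
    ∀ (n : Nat) (t pre : List Char), t.length ≤ n → cs₀ = pre ++ t →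
      pvAfold (fun k => PySem.Chars.isIn k (PySem.Chars.lower cs₀)) t = pvScanB t := by
  set g : List Char → Bool := fun k => PySem.Chars.isIn k (PySem.Chars.lower cs₀) with hgdef
  intro n
  induction n with
  | zero =>
    intro t pre hlen hpre
    have ht : t = [] := List.eq_nil_of_length_eq_zero (by omega)
    subst ht
    rw [pvScanB_nil]
    exact pvFoldNil g pvP
  | succ n ih =>
    intro t pre hlen hpre
    cases t with
    | nil =>
      rw [pvScanB_nil]
      exact pvFoldNil g pvP
    | cons c t' =>
      have hfP : pvP.find? (fun kv => kv.1.isPrefixOf (c :: t')) =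
          (pvPairsB.find? (fun kv => kv.1.toList.isPrefixOf (c :: t'))).map
            (fun kv => (kv.1.toList, kv.2.toList)) := by
        rw [pvP, List.find?_map]; rfl
      cases hf : pvPairsB.find? (fun kv => kv.1.toList.isPrefixOf (c :: t')) with
      | none =>
        rw [hf] at hfP
        have hnom : ∀ kv ∈ pvP, ¬ kv.1 <+: (c :: t') := by
          intro kv hkv hpref
          have := List.find?_eq_none.mp hfP kv hkv
          simp [List.isPrefixOf_iff_prefix] at this
          exact this hpref
        have hstep : ∀ kv ∈ pvP, g kv.1 = true → ∀ X' : List Char, pvT t' X' →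
            ∀ p, p < ([c] : List Char).length → ¬ kv.1 <+: (([c] ++ X').drop p) := by
          intro kv hkv _ X' hT' p hp hpref
          have hp0 : p = 0 := by simpa using hp
          subst hp0
          simp only [List.drop_zero, List.singleton_append] at hpref
          obtain ⟨hk1, _, hkb, _⟩ := pvF1 kv hkv
          cases hk : kv.1 with
          | nil => exact hk1 hk
          | cons k0 k' =>
            rw [hk] at hpref
            obtain ⟨hk0, hk'⟩ := List.cons_prefix_cons.mp hpref
            have hbk' : 'b' ∉ k' := by
              intro hm; apply hkb; rw [hk]; simpa using hm
            have := hT' k' hbk' hk'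
            exact hnom kv hkv (by rw [hk, hk0]; exact List.cons_prefix_cons.mpr ⟨rfl, this⟩)
        have happ := pvFoldApp g t' [c] pvP (fun kv h => h) hstep t' (fun x _ h => h)
        rw [pvScanB_cons_none c t' hf]
        rw [pvAfold, show (c :: t') = [c] ++ t' from rfl, happ.1]
        rw [show pvP.foldl (pvStep g) t' = pvAfold g t' from rfl,
          ih t' (pre ++ [c]) (by simp at hlen ⊢; omega) (by rw [hpre]; simp)]
        rfl
      | some kvS =>
        rw [hf] at hfP
        have hkvP : (kvS.1.toList, kvS.2.toList) ∈ pvP := by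
          rw [pvP]
          exact List.mem_map_of_mem (List.mem_of_find?_eq_some hf)
        have hpref : kvS.1.toList <+: (c :: t') := by
          have := List.find?_some hf
          simpa [List.isPrefixOf_iff_prefix] using this
        obtain ⟨hkine, hvhead, hkib, hkilow⟩ := pvF1 _ hkvP
        simp only at hkine hvhead hkib hkilow
        obtain ⟨rest, hrest⟩ := hpref
        have hkilen : 1 ≤ kvS.1.toList.length := by
          cases hk : kvS.1.toList with
          | nil => exact absurd hk hkine
          | cons a b => simp
        have hki_inf : kvS.1.toList <:+: cs₀ :=
          ⟨pre, rest, by rw [hpre, ← hrest, List.append_assoc]⟩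
        have hgki : g kvS.1.toList = true := by
          rw [hgdef]; exact pvGuardTrue cs₀ _ hkvP hki_inf
        obtain ⟨Q1, Q2, hsplit⟩ := pvFindSplit _ pvP _ hfP
        have hQ1P : ∀ kv ∈ Q1, kv ∈ pvP := fun kv h => by rw [hsplit]; exact List.mem_append_left _ h
        have hQ2P : ∀ kv ∈ Q2, kv ∈ pvP := fun kv h => by
          rw [hsplit]; exact List.mem_append_right _ (List.mem_cons_of_mem _ h)
        have hnodup := pvF0
        rw [hsplit, List.map_append, List.map_cons] at hnodup
        obtain ⟨hn1, hn2, hdisj⟩ := List.nodup_append.mp hnodup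
        have hQ1ne : ∀ kv ∈ Q1, kv.1 ≠ kvS.1.toList := by
          intro kv h heq
          exact hdisj _ (List.mem_map_of_mem h) _ (by simp) heq
        have hQ2ne : ∀ kv ∈ Q2, kv.1 ≠ kvS.1.toList := by
          intro kv h heq
          have : (kvS.1.toList, kvS.2.toList).1 ∉ Q2.map (fun kv => kv.1) := (List.nodup_cons.mp hn2).1
          exact this (by simpa [← heq] using List.mem_map_of_mem (f := fun kv => kv.1) h)
        -- occurrence of the matched key at the head, in cs₀
        have hocc_ki : kvS.1.toList <+: cs₀.drop pre.length := by
          have := pvOccur cs₀ pre (c :: t') kvS.1.toList hpre 0 (by simpa using ⟨rest, hrest⟩)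
          simpa using this
        -- stage-1 step condition
        have hstep1 : ∀ kv ∈ Q1, g kv.1 = true → ∀ X' : List Char, pvT rest X' →
            ∀ p, p < kvS.1.toList.length → ¬ kv.1 <+: ((kvS.1.toList ++ X').drop p) := by
          intro kv hkvQ hgkv X' hT' p hp hprefix
          have hkjP := hQ1P kv hkvQ
          obtain ⟨hkj1, _, hkjb, _⟩ := pvF1 kv hkjP
          have hne := hQ1ne kv hkvQ
          rw [List.drop_append_of_le_length (le_of_lt hp)] at hprefix
          by_cases hlen2 : kv.1.length ≤ (kvS.1.toList.drop p).length
          · have h1 : kv.1 <+: kvS.1.toList.drop p := pvPrefixShort _ _ _ hprefix hlen2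
            have hinf : kv.1 <:+: kvS.1.toList :=
              pvInfixOfPrefixSuffix h1 (List.drop_suffix p kvS.1.toList)
            exact pvF2 _ hkvP kv hkjP (Ne.symm hne) hinf
          · push_neg at hlen2
            obtain ⟨ha, hb⟩ := pvPrefixSplit kv.1 (kvS.1.toList.drop p) X' hprefix (le_of_lt hlen2)
            have halen : 1 ≤ (kvS.1.toList.drop p).length := by
              simp only [List.length_drop]; omega
            have hbb : 'b' ∉ kv.1.drop (kvS.1.toList.drop p).length := by
              intro hm
              apply hkjb
              have : kv.1.drop (kvS.1.toList.drop p).length =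
                  (kv.1.drop 1).drop ((kvS.1.toList.drop p).length - 1) := by
                rw [List.drop_drop]; congr 1; omega
              rw [this] at hm
              exact List.mem_of_mem_drop hm
            have hbrest := hT' _ hbb hb
            have hkj_t : kv.1 <+: (c :: t').drop p := by
              rw [← hrest, List.drop_append_of_le_length (le_of_lt hp)]
              obtain ⟨tl, htl⟩ := ha
              obtain ⟨rb, hrb⟩ := hbrest
              have htl' : tl = kv.1.drop (kvS.1.toList.drop p).length := by
                rw [← htl]; simp
              refine ⟨rb, ?_⟩
              rw [← hrb, ← htl', ← List.append_assoc, htl]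
            have o1 := pvOccur cs₀ pre (c :: t') kv.1 hpre p hkj_t
            have hkjlen : 1 ≤ kv.1.length := by
              cases hk : kv.1 with
              | nil => exact absurd hk hkj1
              | cons a b => simp
            have := hno kv hkjP _ hkvP hne (pre.length + p) pre.length o1 hocc_ki
            simp only at this
            omega
        -- stage-2 step condition
        have hstep2 : ∀ kv ∈ Q2, g kv.1 = true → ∀ X' : List Char, pvT rest X' →
            ∀ p, p < kvS.2.toList.length → ¬ kv.1 <+: ((kvS.2.toList ++ X').drop p) := by
          intro kv hkvQ hgkv X' hT' p hp hprefix
          have hkjP := hQ2P kv hkvQ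
          obtain ⟨hkj1, _, hkjb, _⟩ := pvF1 kv hkjP
          have hne := hQ2ne kv hkvQ
          rw [List.drop_append_of_le_length (le_of_lt hp)] at hprefix
          by_cases hlen2 : kv.1.length ≤ (kvS.2.toList.drop p).length
          · have h1 : kv.1 <+: kvS.2.toList.drop p := pvPrefixShort _ _ _ hprefix hlen2
            have hinf : kv.1 <:+: kvS.2.toList :=
              pvInfixOfPrefixSuffix h1 (List.drop_suffix p kvS.2.toList)
            -- index the split to use the order fact pvF3
            have hnlt : Q1.length < pvP.length := by
              rw [hsplit]; simp
            have hget : pvP.getD Q1.length ([], []) = (kvS.1.toList, kvS.2.toList) := by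
              rw [hsplit, List.getD_eq_getElem?_getD, List.getElem?_append_right le_rfl]
              simp
            have hdropQ : pvP.drop (Q1.length + 1) = Q2 := by
              rw [hsplit]
              simpa using List.drop_length_add_append
                (l₁ := Q1) (l₂ := (fun kv => (kv.1.toList, kv.2.toList)) kvS :: Q2) (i := 1)
            have hspec := pvF3 Q1.length hnlt kv (by rw [hdropQ]; exact hkvQ) (by rw [hget]; exact hinf)
            rw [hget] at hspec
            rw [show ((kvS.1.toList, kvS.2.toList) : List Char × List Char).1 = kvS.1.toList from rfl] at hspec
            have hkj_inf_low : kv.1 <:+: PySem.Chars.lower cs₀ := by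
              have : PySem.Chars.isIn kv.1 (PySem.Chars.lower cs₀) = true := by
                rw [hgdef] at hgkv; exact hgkv
              exact (PySem.Chars.isIn_iff_infix _ _).mp this
            rcases hspec with ⟨hbh, hrh⟩ | ⟨hbc, hrc⟩
            · exact h2a ⟨by rwa [hrh] at hkj_inf_low, by rwa [hbh] at hki_inf⟩
            · exact h2b ⟨by rwa [hrc] at hkj_inf_low, by rwa [hbc] at hki_inf⟩
          · push_neg at hlen2
            obtain ⟨ha, hb⟩ := pvPrefixSplit kv.1 (kvS.2.toList.drop p) X' hprefix (le_of_lt hlen2)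
            have halen : 1 ≤ (kvS.2.toList.drop p).length := by
              simp only [List.length_drop]; omega
            have hbb : 'b' ∉ kv.1.drop (kvS.2.toList.drop p).length := by
              intro hm
              apply hkjb
              have : kv.1.drop (kvS.2.toList.drop p).length =
                  (kv.1.drop 1).drop ((kvS.2.toList.drop p).length - 1) := by
                rw [List.drop_drop]; congr 1; omega
              rw [this] at hm
              exact List.mem_of_mem_drop hm
            have hbrest := hT' _ hbb hb
            -- the matched-block suffix is also a suffix of the key (pvF4)
            have htake : kvS.2.toList.drop p = kv.1.take (kvS.2.toList.drop p).length :=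
              List.prefix_iff_eq_take.mp ha
            have hsuffki : kvS.2.toList.drop p <:+ kvS.1.toList := by
              have h4 := pvF4 _ hkvP kv hkjP (kvS.2.toList.drop p).length
                (by omega) (by omega) (by rw [← htake]; exact List.drop_suffix p _)
              rwa [← htake] at h4
            obtain ⟨w, hw⟩ := hsuffki
            have hwlen : w.length + (kvS.2.toList.drop p).length = kvS.1.toList.length := by
              rw [← hw]; simp
            have hkj_t : kv.1 <+: (c :: t').drop w.length := by
              rw [← hrest, ← hw, List.append_assoc, List.drop_left]
              obtain ⟨tl, htl⟩ := ha
              obtain ⟨rb, hrb⟩ := hbrest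
              have htl' : tl = kv.1.drop (kvS.2.toList.drop p).length := by
                rw [← htl]; simp
              refine ⟨rb, ?_⟩
              rw [← hrb, ← htl', ← List.append_assoc, htl]
            have o1 := pvOccur cs₀ pre (c :: t') kv.1 hpre w.length hkj_t
            have hkjlen : 1 ≤ kv.1.length := by
              cases hk : kv.1 with
              | nil => exact absurd hk hkj1
              | cons a b => simp
            have := hno kv hkjP _ hkvP hne (pre.length + w.length) pre.length o1 hocc_ki
            simp only at this
            omega
        -- assemble
        have hT0 : pvT rest rest := fun x _ h => h
        have s1 := pvFoldApp g rest kvS.1.toList Q1 hQ1P hstep1 rest hT0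
        have hTX2 : pvT rest (pvRepl kvS.1.toList kvS.2.toList (Q1.foldl (pvStep g) rest)) :=
          fun x hbx hxp => s1.2 x hbx (pvPrefixRepl _ _ hkine hvhead _ x hbx hxp)
        have s2 := pvFoldApp g rest kvS.2.toList Q2 hQ2P hstep2 _ hTX2
        have hmid : pvStep g (kvS.1.toList ++ Q1.foldl (pvStep g) rest) (kvS.1.toList, kvS.2.toList) =
            kvS.2.toList ++ pvRepl kvS.1.toList kvS.2.toList (Q1.foldl (pvStep g) rest) := by
          rw [pvStep, if_pos hgki]
          rw [pvRepl_prefix _ _ _ hkine (List.prefix_append _ _), List.drop_left]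
        have hmid2 : pvStep g (Q1.foldl (pvStep g) rest) (kvS.1.toList, kvS.2.toList) =
            pvRepl kvS.1.toList kvS.2.toList (Q1.foldl (pvStep g) rest) := by
          rw [pvStep, if_pos hgki]
        have hA : pvAfold g (c :: t') = kvS.2.toList ++ pvAfold g rest := by
          rw [pvAfold, pvAfold, hsplit, ← hrest]
          rw [List.foldl_append, List.foldl_cons, List.foldl_append, List.foldl_cons]
          rw [s1.1, hmid, hmid2, (s2).1]
        have hreclen : rest.length ≤ n := by
          have hsum : kvS.1.toList.length + rest.length = t'.length + 1 := by
            rw [← List.length_append, hrest]; simp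
          have hlen' : t'.length + 1 ≤ n + 1 := by simpa using hlen
          omega
        have hih := ih rest (pre ++ kvS.1.toList)
          hreclen (by rw [hpre, ← hrest, List.append_assoc])
        rw [hA, hih, pvScanB_cons_some c t' kvS hf]
        congr 1
        -- drop (len-1) t' = rest
        cases hk : kvS.1.toList with
        | nil => exact absurd hk hkine
        | cons k0 ks =>
          rw [hk, List.cons_append] at hrest
          injection hrest with h1 h2
          simp only [List.length_cons, Nat.add_sub_cancel]
          rw [← h2, List.drop_left]

theorem pvFoldBridge (pl : String) :
    ∀ (L : List (String × String)) (acc : String), (∀ kv ∈ L, kv.1.toList ≠ []) →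
      (L.foldl (fun e kv =>
          if PySem.Str.isIn kv.1 (PySem.Str.lower pl) then PySem.Str.replace e kv.1 kv.2 else e)
        acc).toList =
      (L.map (fun kv => (kv.1.toList, kv.2.toList))).foldl
        (pvStep (fun k => PySem.Chars.isIn k (PySem.Chars.lower pl.toList))) acc.toList := by
  intro L
  induction L with
  | nil => intro acc _; rfl
  | cons kv L' ih =>
    intro acc hne
    rw [List.foldl_cons, List.map_cons, List.foldl_cons]
    have hguard : PySem.Str.isIn kv.1 (PySem.Str.lower pl) =
        PySem.Chars.isIn kv.1.toList (PySem.Chars.lower pl.toList) := by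
      simp [PySem.Str.isIn, PySem.Str.lower]
    by_cases hg : PySem.Chars.isIn kv.1.toList (PySem.Chars.lower pl.toList) = true
    · rw [hguard, if_pos hg,
        show pvStep (fun k => PySem.Chars.isIn k (PySem.Chars.lower pl.toList)) acc.toList
            (kv.1.toList, kv.2.toList) = pvRepl kv.1.toList kv.2.toList acc.toList from by
          rw [pvStep, if_pos hg],
        ih _ (fun x hx => hne x (List.mem_cons_of_mem _ hx))]
      congr 1
      rw [show (PySem.Str.replace acc kv.1 kv.2).toList =
          PySem.Chars.replace acc.toList kv.1.toList kv.2.toList from by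
        rw [PySem.Str.replace, String.toList_ofList]]
      exact pvReplace_eq _ _ _ (hne kv (by simp))
    · rw [hguard, if_neg hg,
        show pvStep (fun k => PySem.Chars.isIn k (PySem.Chars.lower pl.toList)) acc.toList
            (kv.1.toList, kv.2.toList) = acc.toList from by
          rw [pvStep, if_neg hg]]
      exact ih _ (fun x hx => hne x (List.mem_cons_of_mem _ hx))

/-- port A computes pvAfold. -/
theorem pvPortA_chars (p : String) :
    (enhance_color_accuracy_py p).toList =
      pvAfold (fun k => PySem.Chars.isIn k (PySem.Chars.lower p.toList)) p.toList := by
  rw [enhance_color_accuracy_py, pvAfold,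
    show pvP = pvPairsA.map (fun kv => (kv.1.toList, kv.2.toList)) from rfl]
  exact pvFoldBridge p pvPairsA p (by decide)

theorem pvPortB_chars (p : String) :
    (enhance_color_accuracy_py_alt p).toList = pvScanB p.toList := by
  simp [enhance_color_accuracy_py_alt, String.toList_ofList]

-- ===== VERDICT (by name: the statement is the Claim_ definition above) =====
theorem enhance_color_accuracy_py_spec : Claim_equal_enhance_color_accuracy_py := by
  intro prompt _ hpre
  unfold Spec_enhance_color_accuracy_py
  rw [Pre_enhance_color_accuracy_py] at hpre
  have hnD : ¬(((["blue cared house", "blue cared car", "red cared house", "green cared house",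
      "green cared car", "yellow cared house", "yellow cared car"].any
       (fun m => PySem.Str.isIn m prompt))
    || (PySem.Str.isIn "red house" (PySem.Str.lower prompt) && PySem.Str.isIn "blue house" prompt)
    || (PySem.Str.isIn "red car" (PySem.Str.lower prompt) && PySem.Str.isIn "blue car" prompt)) = true) :=
    fun h => by rw [h] at hpre; exact Bool.true_eq_false.mp hpre
  have h1 : ¬ pvOv7 prompt.toList := by
    rintro (h | h | h | h | h | h | h) <;>
      · apply hnD
        simp only [Bool.or_eq_true, List.any_eq_true]
        exact Or.inl (Or.inl ⟨_, by simp, (PySem.Str.isIn_iff_infix _ _).mpr h⟩)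
  have h2a : ¬("red house".toList <:+: PySem.Chars.lower prompt.toList ∧
      "blue house".toList <:+: prompt.toList) := by
    rintro ⟨hx, hy⟩
    apply hnD
    simp only [Bool.or_eq_true, Bool.and_eq_true]
    exact Or.inl (Or.inr ⟨(PySem.Str.isIn_iff_infix _ _).mpr (by rw [PySem.Str.toList_lower]; exact hx),
      (PySem.Str.isIn_iff_infix _ _).mpr hy⟩)
  have h2b : ¬("red car".toList <:+: PySem.Chars.lower prompt.toList ∧
      "blue car".toList <:+: prompt.toList) := by
    rintro ⟨hx, hy⟩
    apply hnD
    simp only [Bool.or_eq_true, Bool.and_eq_true]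
    exact Or.inr ⟨(PySem.Str.isIn_iff_infix _ _).mpr (by rw [PySem.Str.toList_lower]; exact hx),
      (PySem.Str.isIn_iff_infix _ _).mpr hy⟩
  have hno : pvNoOv prompt.toList := by
    intro kv hkv kv' hkv' hne p q hp hq
    by_contra hcon
    rw [not_or] at hcon
    rcases le_total p q with hle | hle
    · exact h1 (pvOverlapCore prompt.toList kv kv' hkv hkv' hne p q hp hq hle (by omega))
    · exact h1 (pvOverlapCore prompt.toList kv' kv hkv' hkv (Ne.symm hne) q p hq hp hle (by omega))
  apply String.toList_inj.mp
  rw [pvPortA_chars, pvPortB_chars]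
  exact pvMain prompt.toList hno h2a h2b prompt.toList.length prompt.toList [] le_rfl (by simp)
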